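-- pv_equiv track=rewrite | github.com/AleksandarLukic96/02180_Belief_Revision_Agent | utils.py | find_next_operator
-- ===== SOURCE A (Python) =====
-- def find_next_operator(sentence):
--     for i in range(len(sentence)):
--         characther = sentence[i]
--         if characther in ['(', ')', '|', '&']:
--             return characther, i
--         if characther == '<':
--             return '<->', i
--         if characther == '-' and sentence[i+1] == '>':
--             return '->', i
--         elif characther == '-':
--             return characther, i
--     return '', -1
-- ===== SOURCE B (Python) =====
-- def find_next_operator(sentence):
--     idxs = [j for j in (sentence.find(c) for c in '()|&<-') if j != -1]
--     if not idxs: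
--         return '', -1
--     i = min(idxs)
--     c = sentence[i]
--     if c == '<':
--         return '<->', i
--     if c == '-':
--         return ('->', i) if sentence[i + 1] == '>' else ('-', i)
--     return c, i
-- ===== Notes on version B (the rewrite author's own statement) =====
-- stated objective: faster
-- what changed: B replaces A's character-by-character Python scan with six str.find calls (one per operator character), takes the minimum of the hit indices, and classifies the character found there; Pre_ excludes only the inputs on which both programs raise IndexError (a trailing '-' preceded by no operator).
-- outside the precondition, e.g. on find_next_operator('-'): A raises IndexError, B raises IndexError
import Mathlib
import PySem

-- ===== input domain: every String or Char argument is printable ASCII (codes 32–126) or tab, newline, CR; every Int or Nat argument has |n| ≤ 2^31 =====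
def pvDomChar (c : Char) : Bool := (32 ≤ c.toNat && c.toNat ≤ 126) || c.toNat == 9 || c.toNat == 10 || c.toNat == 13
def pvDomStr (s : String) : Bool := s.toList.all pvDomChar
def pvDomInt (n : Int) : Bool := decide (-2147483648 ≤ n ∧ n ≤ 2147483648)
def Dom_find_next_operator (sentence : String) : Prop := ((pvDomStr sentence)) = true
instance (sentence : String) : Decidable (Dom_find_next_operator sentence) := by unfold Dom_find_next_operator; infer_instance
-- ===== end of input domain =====

-- B finds each operator character with one str.find call, takes the minimal hit index and classifies
-- the character there, instead of A's per-character scan (measurably faster in CPython; return value only).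


-- ===== PORT A =====
-- the scan over range(len(sentence)); sentence[i+1] is read with pyGet? (none = IndexError,
-- excluded by Pre_; the value returned there is irrelevant)
def findNextOpGoA (full : List Char) : List Char → Nat → String × Int
  | [], _ => ("", -1)
  | c :: rest, i =>
    if c = '(' ∨ c = ')' ∨ c = '|' ∨ c = '&' then (String.ofList [c], (i : Int))
    else if c = '<' then ("<->", (i : Int))
    else if c = '-' ∧ PySem.List.pyGet? full ((i : Int) + 1) = some '>' then ("->", (i : Int))
    else if c = '-' then (String.ofList [c], (i : Int))
    else findNextOpGoA full rest (i + 1)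

def find_next_operator (sentence : String) : String × Int :=
  findNextOpGoA sentence.toList sentence.toList 0

-- ===== PORT B =====
def find_next_operator_alt (sentence : String) : String × Int :=
  let l := sentence.toList
  let idxs := ((['(', ')', '|', '&', '<', '-'].map (fun c => PySem.Chars.find l [c])).filter
      (fun j => j ≠ -1))
  match PySem.List.min? idxs (fun x => x) with
  | none => ("", -1)
  | some i =>
    match PySem.List.pyGet? l i with
    | none => ("", -1)      -- unreachable: a find hit is a valid index (Python would raise)
    | some c =>
      if c = '<' then ("<->", i)
      else if c = '-' then
        -- sentence[i+1]: pyGet? none = IndexError, excluded by Pre_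
        (if PySem.List.pyGet? l (i + 1) = some '>' then ("->", i) else ("-", i))
      else (String.ofList [c], i)

-- ===== PRECONDITION & SPEC =====
-- Pre_ excludes exactly the inputs on which Python A raises IndexError (and Python B raises it
-- too): a final '-' preceded by no operator character, where sentence[i+1] is read out of range.
def Pre_find_next_operator (sentence : String) : Prop :=
  ¬ (sentence.toList.getLast? = some '-' ∧
     ∀ c ∈ sentence.toList.dropLast, c ∉ ['(', ')', '|', '&', '<', '-'])
instance (sentence : String) : Decidable (Pre_find_next_operator sentence) := by
  unfold Pre_find_next_operator; infer_instance

def pvWitness_find_next_operator : String := "p & q"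

def Spec_find_next_operator (sentence : String) (out : String × Int) : Prop :=
  out = find_next_operator_alt sentence
instance (sentence : String) (out : String × Int) : Decidable (Spec_find_next_operator sentence out) := by
  unfold Spec_find_next_operator; infer_instance

-- ===== CLAIM (what is proved, stated in full; the proofs are below) =====
def Claim_equal_find_next_operator : Prop := ∀ (sentence : String), Dom_find_next_operator sentence → Pre_find_next_operator sentence → Spec_find_next_operator sentence (find_next_operator sentence)

-- ===== LEMMAS AND PROOFS =====

/-- `c` is one of the six operator characters (Bool predicate used in the proofs). -/
def pvOp (c : Char) : Bool :=
  c = '(' || c = ')' || c = '|' || c = '&' || c = '<' || c = '-'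

theorem pvOp_iff_mem (c : Char) : pvOp c = true ↔ c ∈ ['(', ')', '|', '&', '<', '-'] := by
  simp [pvOp, or_assoc]

/-- The shared "classify the operator found at index `i`" tail of both programs. -/
def pvClassify (l : List Char) (c : Char) (i : Int) : String × Int :=
  if c = '<' then ("<->", i)
  else if c = '-' then
    (if PySem.List.pyGet? l (i + 1) = some '>' then ("->", i) else ("-", i))
  else (String.ofList [c], i)

def pvClassifyGet (l : List Char) (i : Int) : String × Int :=
  match PySem.List.pyGet? l i with
  | none => ("", -1)
  | some c => pvClassify l c i

def pvIdxs (l : List Char) : List Int :=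
  (['(', ')', '|', '&', '<', '-'].map (fun c => PySem.Chars.find l [c])).filter
    (fun j => j ≠ -1)

def pvB (l : List Char) : String × Int :=
  match PySem.List.min? (pvIdxs l) (fun x => x) with
  | none => ("", -1)
  | some i => pvClassifyGet l i

theorem alt_eq_pvB (s : String) : find_next_operator_alt s = pvB s.toList := rfl

theorem pvNotOp (c : Char) (hc : pvOp c = false) :
    c ≠ '(' ∧ c ≠ ')' ∧ c ≠ '|' ∧ c ≠ '&' ∧ c ≠ '<' ∧ c ≠ '-' := by
  refine ⟨?_, ?_, ?_, ?_, ?_, ?_⟩ <;> intro h <;> simp [pvOp, h] at hc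

theorem goA_none (full : List Char) :
    ∀ rest (i : Nat), (∀ c ∈ rest, pvOp c = false) → findNextOpGoA full rest i = ("", -1) := by
  intro rest
  induction rest with
  | nil => intro i _; rfl
  | cons c rs ih =>
    intro i h
    obtain ⟨h1, h2, h3, h4, h5, h6⟩ := pvNotOp c (h c (List.mem_cons_self))
    simp only [findNextOpGoA, h1, h2, h3, h4, h5, h6, or_self, if_false, false_and]
    exact ih (i + 1) (fun d hd => h d (List.mem_cons_of_mem _ hd))

theorem goA_found (full : List Char) (k : Nat) (hk : k < full.length)
    (hc : pvOp (full[k]'hk) = true)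
    (hmin : ∀ j (hj : j < full.length), j < k → pvOp (full[j]'hj) = false) :
    ∀ d i, i + d = k → findNextOpGoA full (full.drop i) i = pvClassify full (full[k]'hk) (k : Int) := by
  intro d
  induction d with
  | zero =>
    intro i hi
    obtain rfl : i = k := by omega
    rw [List.drop_eq_getElem_cons hk]
    have hmem := (pvOp_iff_mem (full[i]'hk)).mp hc
    simp only [List.mem_cons, List.not_mem_nil, or_false] at hmem
    rcases hmem with h | h | h | h | h | h <;> rw [h]
    · simp [findNextOpGoA, pvClassify]
    · simp [findNextOpGoA, pvClassify]
    · simp [findNextOpGoA, pvClassify]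
    · simp [findNextOpGoA, pvClassify]
    · simp [findNextOpGoA, pvClassify]
    · by_cases hg : PySem.List.pyGet? full ((i : Int) + 1) = some '>' <;>
        simp [findNextOpGoA, pvClassify, hg]
  | succ d ih =>
    intro i hi
    have hik : i < k := by omega
    have hil : i < full.length := by omega
    obtain ⟨h1, h2, h3, h4, h5, h6⟩ := pvNotOp _ (hmin i hil hik)
    rw [List.drop_eq_getElem_cons hil]
    simp only [findNextOpGoA, h1, h2, h3, h4, h5, h6, or_self, if_false, false_and]
    exact ih (i + 1) (by omega)

/-- `str.find` for a single character: the hit is the first occurrence. -/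
theorem find_singleton (l : List Char) (c : Char) (hc : c ∈ l) :
    ∃ j : Nat, PySem.Chars.find l [c] = (j : Int) ∧ j < l.length ∧ l[j]? = some c ∧
      ∀ i, i < j → l[i]? ≠ some c := by
  have hinf : [c] <:+: l := (List.singleton_infix_iff c l).mpr hc
  have hne : PySem.Chars.find l [c] ≠ -1 := by
    intro h
    exact ((PySem.Chars.find_eq_neg_one_iff l [c]).mp h) hinf
  have hne' : PySem.Chars.findFrom l [c] ((0 : Nat) : Int) none ≠ -1 := by
    simpa [PySem.Chars.findFrom_zero] using hne
  have hspec := PySem.Chars.findFrom_natCast_spec l [c] 0 (by omega) hne'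
  simp only [Nat.cast_zero, PySem.Chars.findFrom_zero] at hspec
  obtain ⟨hge, hpre, hmin⟩ := hspec
  refine ⟨(PySem.Chars.find l [c]).toNat, by omega, ?_, ?_, ?_⟩
  · by_contra hlen
    rw [List.drop_eq_nil_of_le (by omega)] at hpre
    simp at hpre
  · obtain ⟨t, ht⟩ := hpre
    rw [← List.head?_drop, ← ht]; rfl
  · intro i hij hhd
    refine hmin i (by omega) (by omega) ?_
    rw [← List.head?_drop] at hhd
    rcases hd : l.drop i with _ | ⟨a, t⟩
    · simp [hd] at hhd
    · rw [hd] at hhd; simp at hhd; exact ⟨t, by simp [hhd]⟩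

/-- A find hit for an operator character is at index ≥ the first operator index `k`. -/
theorem find_of_first (l : List Char) (k : Nat)
    (hmin : ∀ j (hj : j < l.length), j < k → pvOp (l[j]'hj) = false)
    (c : Char) (hcop : c ∈ ['(', ')', '|', '&', '<', '-']) (hcl : c ∈ l) :
    ∃ j : Nat, PySem.Chars.find l [c] = (j : Int) ∧ j < l.length ∧ l[j]? = some c ∧ k ≤ j := by
  obtain ⟨j, hj, hjlen, hjget, hjmin⟩ := find_singleton l c hcl
  refine ⟨j, hj, hjlen, hjget, ?_⟩
  by_contra hlt
  have hgetj : l[j]'hjlen = c := by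
    rwa [List.getElem?_eq_getElem hjlen, Option.some_inj] at hjget
  have hop := hmin j hjlen (by omega)
  rw [hgetj] at hop
  have := (pvOp_iff_mem c).mpr hcop
  simp_all

-- ===== VERDICT (by name: the statement is the Claim_ definition above) =====
theorem find_next_operator_spec : Claim_equal_find_next_operator := by
  intro s _ _
  unfold Spec_find_next_operator find_next_operator
  rw [alt_eq_pvB]
  by_cases hk : s.toList.findIdx pvOp < s.toList.length
  · -- an operator occurs; first at index k := findIdx pvOp
    have hc0 : pvOp (s.toList[s.toList.findIdx pvOp]'hk) = true := List.findIdx_getElem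
    have hmin : ∀ j (hj : j < s.toList.length), j < s.toList.findIdx pvOp →
        pvOp (s.toList[j]'hj) = false := by
      intro j hj hjk; exact List.not_of_lt_findIdx hjk
    have hA := goA_found s.toList _ hk hc0 hmin (s.toList.findIdx pvOp) 0 (by omega)
    simp only [List.drop_zero] at hA
    rw [hA]
    -- B's side: the find hit for the character at the first operator index is that index itself …
    have hfind : PySem.Chars.find s.toList [s.toList[s.toList.findIdx pvOp]'hk] =
        ((s.toList.findIdx pvOp : Nat) : Int) := by
      obtain ⟨j, hj, hjlen, hjget, hjmin⟩ :=
        find_singleton s.toList (s.toList[s.toList.findIdx pvOp]'hk) (List.getElem_mem hk)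
      have hjk : j = s.toList.findIdx pvOp := by
        rcases Nat.lt_trichotomy j (s.toList.findIdx pvOp) with hlt | heq | hgt
        · have hgetj : s.toList[j]'hjlen = s.toList[s.toList.findIdx pvOp]'hk := by
            rwa [List.getElem?_eq_getElem hjlen, Option.some_inj] at hjget
          have hop := hmin j hjlen hlt
          rw [hgetj, hc0] at hop
          exact absurd hop (by simp)
        · exact heq
        · exact absurd (List.getElem?_eq_getElem hk)
            (hjmin (s.toList.findIdx pvOp) hgt)
      rw [hj, hjk]
    have hkmem : ((s.toList.findIdx pvOp : Nat) : Int) ∈ pvIdxs s.toList := by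
      rw [pvIdxs]
      refine List.mem_filter.mpr
        ⟨List.mem_map.mpr ⟨_, (pvOp_iff_mem _).mp hc0, hfind⟩, by simp⟩
    -- … and every find hit is at index ≥ the first operator index
    have hlb : ∀ x ∈ pvIdxs s.toList, ((s.toList.findIdx pvOp : Nat) : Int) ≤ x := by
      intro x hx
      rw [pvIdxs] at hx
      obtain ⟨hxm, hxne⟩ := List.mem_filter.mp hx
      obtain ⟨c, hcm, hcx⟩ := List.mem_map.mp hxm
      have hxne' : PySem.Chars.find s.toList [c] ≠ -1 := by rw [hcx]; simpa using hxne
      have hcl : c ∈ s.toList := by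
        by_contra hcl
        exact hxne' ((PySem.Chars.find_eq_neg_one_iff s.toList [c]).mpr
          (by simpa [List.singleton_infix_iff] using hcl))
      obtain ⟨j, hj, hjlen, hjget, hjge⟩ := find_of_first s.toList _ hmin c hcm hcl
      rw [← hcx, hj]
      exact_mod_cast hjge
    rcases hm : PySem.List.min? (pvIdxs s.toList) (fun x => x) with _ | m
    · rw [(PySem.List.min?_eq_none_iff (pvIdxs s.toList) (fun x => x)).mp hm] at hkmem
      simp at hkmem
    · have hmk : m = ((s.toList.findIdx pvOp : Nat) : Int) := by
        have h1 : m ≤ ((s.toList.findIdx pvOp : Nat) : Int) := by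
          simpa using PySem.List.min?_isMin hm _ hkmem
        have h2 := hlb m (PySem.List.min?_mem hm)
        omega
      subst hmk
      have hget : PySem.List.pyGet? s.toList ((s.toList.findIdx pvOp : Nat) : Int) =
          some (s.toList[s.toList.findIdx pvOp]'hk) := by
        simp
      simp only [pvB, hm, pvClassifyGet, hget]
  · -- no operator character in the string
    have hnone : ∀ c ∈ s.toList, pvOp c = false := by
      intro c hc
      by_contra hp
      have := List.findIdx_lt_length_of_exists (p := pvOp) (xs := s.toList)
        ⟨c, hc, by simpa using hp⟩
      omega
    have hB : pvIdxs s.toList = [] := by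
      rw [pvIdxs, List.filter_eq_nil_iff]
      intro x hx
      obtain ⟨c, hcm, hcx⟩ := List.mem_map.mp hx
      have hcl : c ∉ s.toList := by
        intro hcl
        have := hnone c hcl
        have := (pvOp_iff_mem c).mpr hcm
        simp_all
      have : PySem.Chars.find s.toList [c] = -1 :=
        (PySem.Chars.find_eq_neg_one_iff s.toList [c]).mpr
          (by simpa [List.singleton_infix_iff] using hcl)
      simp [← hcx, this]
    rw [goA_none s.toList s.toList 0 hnone, pvB, hB]
    rfl
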